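-- pv_equiv track=rewrite | github.com/IIHTDevelopers/Yaksha-Python-A20-sets--Social_Network_Graph_Analysis-Template | social_network_graph_analysis.py | identify_bridge_users
-- ===== SOURCE A (Python) =====
-- def identify_bridge_users(communities):
--     """
--     Identify users that connect multiple communities.
--
--     Args:
--         communities (dict): Dictionary of community sets
--
--     Returns:
--         dict: Dictionary with users as keys and set of communities as values
--     """
--     if communities is None:
--         raise ValueError("Communities data cannot be None")
--
--     # Create a dictionary to track which communities each user belongs to
--     user_communities = {}
--
--     # Go through each community and add users to the tracking dictionary
--     for community_name, members in communities.items():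
--         for user in members:
--             if user not in user_communities:
--                 user_communities[user] = set()
--             user_communities[user].add(community_name)
--
--     # Filter to only users that are in more than one community
--     bridge_users = {user: comms for user, comms in user_communities.items() if len(comms) > 1}
--
--     return bridge_users
-- ===== SOURCE B (Python) =====
-- def identify_bridge_users(communities):
--     """Same result as A: per-user repeated scan instead of building an inverse index."""
--     if communities is None:
--         raise ValueError("Communities data cannot be None")
--
--     # All users, in order of first appearance across the communities.
--     users = dict.fromkeys(user for members in communities.values() for user in members)
--
--     bridge_users = {}
--     for user in users:
--         comms = {name for name, members in communities.items() if user in members}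
--         if len(comms) > 1:
--             bridge_users[user] = comms
--     return bridge_users
-- ===== Notes on version B (the rewrite author's own statement) =====
-- stated objective: alternative
-- what changed: Instead of one pass building an inverse user->communities index dict, B collects the users in first-appearance order and, for each user, rescans all communities testing membership to build that user's community set.
import Mathlib
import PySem

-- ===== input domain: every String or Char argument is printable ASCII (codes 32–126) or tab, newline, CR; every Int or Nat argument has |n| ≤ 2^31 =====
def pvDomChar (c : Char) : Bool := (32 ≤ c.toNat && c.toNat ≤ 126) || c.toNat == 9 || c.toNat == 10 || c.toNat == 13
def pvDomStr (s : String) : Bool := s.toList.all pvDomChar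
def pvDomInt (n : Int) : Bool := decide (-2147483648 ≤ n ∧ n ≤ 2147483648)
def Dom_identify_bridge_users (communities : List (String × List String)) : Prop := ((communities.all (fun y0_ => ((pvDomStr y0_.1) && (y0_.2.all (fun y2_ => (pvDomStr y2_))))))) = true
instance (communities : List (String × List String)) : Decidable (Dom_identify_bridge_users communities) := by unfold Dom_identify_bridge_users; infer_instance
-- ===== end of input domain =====

-- B computes the same bridge-user dict by a per-user rescan of all communities instead of A's
-- single-pass inverse index (alternative decomposition, not claimed faster).

-- ===== PORT A =====
def pvStepA (community_name : String) (uc : PySem.Dict String (PySem.Set String)) (user : String) :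
    PySem.Dict String (PySem.Set String) :=
  let uc := if uc.contains user then uc else uc.insert user PySem.Set.empty
  uc.modify user PySem.Set.empty (fun s => s.add community_name)

def identify_bridge_users (communities : List (String × List String)) : List (String × List String) :=
  let user_communities : PySem.Dict String (PySem.Set String) :=
    communities.foldl (fun uc p => p.2.foldl (pvStepA p.1) uc) PySem.Dict.empty
  ((user_communities.items.filter (fun q => decide (1 < q.2.length))).foldl
      (fun d q => d.insert q.1 q.2) PySem.Dict.empty).items


-- ===== PORT B =====
def identify_bridge_users_alt (communities : List (String × List String)) : List (String × List String) :=
  -- users = dict.fromkeys(user for members in communities.values() for user in members)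
  let users : List String := PySem.List.dedup (communities.flatMap (fun p => p.2))
  users.foldl
    (fun res user =>
      -- comms = {name for name, members in communities.items() if user in members}
      let comms : PySem.Set String :=
        PySem.Set.ofList ((communities.filter (fun p => decide (user ∈ p.2))).map (fun p => p.1))
      if decide (1 < comms.length) then res ++ [(user, comms)] else res)
    []


-- ===== PRECONDITION & SPEC =====
def Spec_identify_bridge_users (communities : List (String × List String)) (out : List (String × List String)) : Prop := out = identify_bridge_users_alt communities
instance (communities : List (String × List String)) (out : List (String × List String)) : Decidable (Spec_identify_bridge_users communities out) := by unfold Spec_identify_bridge_users; infer_instance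

-- ===== CLAIM (what is proved, stated in full; the proofs are below) =====
def Claim_equal_identify_bridge_users : Prop := ∀ (communities : List (String × List String)), Dom_identify_bridge_users communities → Spec_identify_bridge_users communities (identify_bridge_users communities)

-- ===== LEMMAS AND PROOFS =====

def pvComm (cs : List (String × List String)) (u : String) : PySem.Set String :=
  PySem.Set.ofList ((cs.filter (fun p => decide (u ∈ p.2))).map (fun p => p.1))
def pvUsers (cs : List (String × List String)) : List String :=
  PySem.List.dedup (cs.flatMap (fun p => p.2))
def pvG (cs : List (String × List String)) : List (String × PySem.Set String) :=
  (pvUsers cs).map (fun u => (u, pvComm cs u))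

lemma pvComm_snoc_ne (cs : List (String × List String)) (n : String) (ps : List String)
    (u v : String) (h : v ≠ u) :
    pvComm (cs ++ [(n, ps ++ [u])]) v = pvComm (cs ++ [(n, ps)]) v := by
  simp [pvComm, List.filter_append, List.filter_cons, List.map_append, h]
  split_ifs <;> simp

lemma pvComm_snoc_self (cs : List (String × List String)) (n : String) (ps : List String)
    (u : String) :
    pvComm (cs ++ [(n, ps ++ [u])]) u = (pvComm (cs ++ [(n, ps)]) u).add n := by
  by_cases hu : u ∈ ps
  · simp [pvComm, List.filter_append, List.filter_nil, List.map_append, List.mem_append, hu,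
      PySem.Set.ofList_append_singleton, PySem.Set.add_of_mem, PySem.Set.mem_add]
  · simp [pvComm, List.filter_append, List.filter_nil, List.map_append, List.mem_append, hu,
      PySem.Set.ofList_append_singleton]

lemma pvUsers_snoc (cs : List (String × List String)) (n : String) (ps : List String) (u : String) :
    pvUsers (cs ++ [(n, ps ++ [u])]) = PySem.Set.add (pvUsers (cs ++ [(n, ps)])) u := by
  simp [pvUsers, List.flatMap_append, PySem.List.dedup_eq_ofList, ← List.append_assoc,
    PySem.Set.ofList_append_singleton]

lemma pvG_nil_members (cs : List (String × List String)) (n : String) :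
    pvG (cs ++ [(n, [])]) = pvG cs := by
  simp [pvG, pvUsers, pvComm, List.filter_append, List.flatMap_append]

lemma pvG_keys (cs : List (String × List String)) :
    (PySem.Dict.mk (pvG cs)).keys = pvUsers cs := by
  simp [PySem.Dict.keys, pvG, List.map_map, Function.comp_def]

lemma pvUsers_nodup (cs : List (String × List String)) : (pvUsers cs).Nodup := by
  simp [pvUsers, PySem.List.dedup_eq_ofList, PySem.Set.nodup_ofList]

lemma mk_contains (cs : List (String × List String)) (u : String) :
    (PySem.Dict.mk (pvG cs)).contains u = decide (u ∈ pvUsers cs) := by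
  rw [PySem.Dict.contains_eq_decide_mem_keys, pvG_keys]

lemma mk_getD (cs : List (String × List String)) (u : String) (hu : u ∈ pvUsers cs) :
    (PySem.Dict.mk (pvG cs)).getD u PySem.Set.empty = pvComm cs u := by
  apply PySem.Dict.getD_of_mem_items
  · show (u, pvComm cs u) ∈ pvG cs
    exact List.mem_map_of_mem hu
  · rw [pvG_keys]; exact pvUsers_nodup cs

lemma pvStepA_G (cs : List (String × List String)) (n : String) (ps : List String) (u : String) :
    pvStepA n (PySem.Dict.mk (pvG (cs ++ [(n, ps)]))) u
      = PySem.Dict.mk (pvG (cs ++ [(n, ps ++ [u])])) := by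
  by_cases hu : u ∈ pvUsers (cs ++ [(n, ps)])
  · have hc : (PySem.Dict.mk (pvG (cs ++ [(n, ps)]))).contains u = true := by
      rw [mk_contains]; simp [hu]
    unfold pvStepA
    simp only [hc, if_true, PySem.Dict.modify]
    rw [mk_getD _ _ hu]
    apply PySem.Dict.ext
    rw [PySem.Dict.items_insert_of_contains _ _ hc]
    show List.map _ (pvG (cs ++ [(n, ps)])) = pvG (cs ++ [(n, ps ++ [u])])
    rw [pvG, pvG, pvUsers_snoc, PySem.Set.add_of_mem hu, List.map_map]
    apply List.map_congr_left
    intro v hv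
    by_cases hvu : v = u
    · subst hvu
      simp [Function.comp, pvComm_snoc_self]
    · simp [Function.comp, hvu, pvComm_snoc_ne cs n ps u v hvu]
  · have hc : (PySem.Dict.mk (pvG (cs ++ [(n, ps)]))).contains u = false := by
      rw [mk_contains]; simp [hu]
    have hins : (PySem.Dict.mk (pvG (cs ++ [(n, ps)]))).insert u PySem.Set.empty
        = PySem.Dict.mk (pvG (cs ++ [(n, ps)]) ++ [(u, PySem.Set.empty)]) := by
      apply PySem.Dict.ext
      rw [PySem.Dict.items_insert_of_not_contains _ _ hc]
    have hkeys : (PySem.Dict.mk (pvG (cs ++ [(n, ps)]) ++ [(u, PySem.Set.empty)])).keys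
        = pvUsers (cs ++ [(n, ps)]) ++ [u] := by
      simp [PySem.Dict.keys, pvG, List.map_map, Function.comp_def]
    have hcont : (PySem.Dict.mk (pvG (cs ++ [(n, ps)]) ++ [(u, PySem.Set.empty)])).contains u = true := by
      rw [PySem.Dict.contains_eq_decide_mem_keys, hkeys]; simp
    have hgetD : (PySem.Dict.mk (pvG (cs ++ [(n, ps)]) ++ [(u, PySem.Set.empty)])).getD u PySem.Set.empty
        = PySem.Set.empty := by
      apply PySem.Dict.getD_of_mem_items
      · show (u, PySem.Set.empty) ∈ pvG (cs ++ [(n, ps)]) ++ [(u, PySem.Set.empty)]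
        simp
      · rw [hkeys]
        rw [List.nodup_append]
        refine ⟨pvUsers_nodup _, List.nodup_singleton u, ?_⟩
        intro a ha b hb he
        exact hu ((he.trans (List.mem_singleton.mp hb)) ▸ ha)
    unfold pvStepA
    simp only [hc, Bool.false_eq_true, if_false, PySem.Dict.modify]
    rw [hins, hgetD]
    apply PySem.Dict.ext
    rw [PySem.Dict.items_insert_of_contains _ _ hcont]
    show List.map _ (pvG (cs ++ [(n, ps)]) ++ [(u, PySem.Set.empty)]) = pvG (cs ++ [(n, ps ++ [u])])
    have humem : ¬ (u ∈ List.flatMap (fun p => p.2) cs ∨ u ∈ ps) := by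
      intro h
      apply hu
      simp only [pvUsers, PySem.List.dedup_eq_ofList, PySem.Set.mem_ofList, List.flatMap_append,
        List.mem_append, List.flatMap_cons, List.flatMap_nil, List.append_nil]
      exact h
    have hne : ∀ p ∈ cs, u ∉ p.2 := fun p hp hmem =>
      humem (Or.inl (List.mem_flatMap.mpr ⟨p, hp, hmem⟩))
    have hps : u ∉ ps := fun hmem => humem (Or.inr hmem)
    have hcomm : pvComm (cs ++ [(n, ps ++ [u])]) u = PySem.Set.add PySem.Set.empty n := by
      have hfil : List.filter (fun p => decide (u ∈ p.2)) cs = [] := by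
        rw [List.filter_eq_nil_iff]; intro p hp; simpa using hne p hp
      simp [pvComm, List.filter_append, hfil]
      rfl
    rw [pvG, pvG, pvUsers_snoc, PySem.Set.add_of_not_mem hu, List.map_append, List.map_map,
      List.map_append]
    congr 1
    · apply List.map_congr_left
      intro v hv
      have hvu : v ≠ u := fun h => hu (h ▸ hv)
      simp [Function.comp, hvu, pvComm_snoc_ne cs n ps u v hvu]
    · simp [hcomm]

lemma pvFoldMembers (cs : List (String × List String)) (n : String) (ms ps : List String) :
    ms.foldl (pvStepA n) (PySem.Dict.mk (pvG (cs ++ [(n, ps)])))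
      = PySem.Dict.mk (pvG (cs ++ [(n, ps ++ ms)])) := by
  induction ms generalizing ps with
  | nil => simp
  | cons u ms ih =>
      simp only [List.foldl_cons, pvStepA_G]
      rw [ih (ps ++ [u])]
      simp


lemma pvFoldA (cs : List (String × List String)) :
    cs.foldl (fun uc p => p.2.foldl (pvStepA p.1) uc) PySem.Dict.empty
      = PySem.Dict.mk (pvG cs) := by
  induction cs using List.reverseRecOn with
  | nil => rfl
  | append_singleton cs p ih =>
      rw [List.foldl_append, ih]
      have h0 : PySem.Dict.mk (pvG cs) = PySem.Dict.mk (pvG (cs ++ [(p.1, [])])) := by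
        rw [pvG_nil_members]
      simp only [List.foldl_cons, List.foldl_nil]
      rw [h0, pvFoldMembers cs p.1 p.2 []]
      simp


-- ===== VERDICT (by name: the statement is the Claim_ definition above) =====
theorem identify_bridge_users_spec : Claim_equal_identify_bridge_users := by
  intro communities _
  unfold Spec_identify_bridge_users
  unfold identify_bridge_users identify_bridge_users_alt
  rw [pvFoldA]
  have hfstnodup : ((pvG communities).map Prod.fst).Nodup := by
    have h := pvUsers_nodup communities
    simpa [pvG, List.map_map, Function.comp_def] using h
  have hsub : ((List.filter (fun q => decide (1 < q.2.length)) (pvG communities)).map Prod.fst).Nodup :=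
    List.Nodup.sublist (List.Sublist.map Prod.fst List.filter_sublist) hfstnodup
  have hitems := PySem.Dict.items_foldl_insert_fresh
    (List.filter (fun q => decide (1 < q.2.length)) (pvG communities))
    Prod.fst Prod.snd PySem.Dict.empty
    (fun a _ => PySem.Dict.contains_empty _) hsub
  show ((List.filter _ (pvG communities)).foldl (fun d q => d.insert q.1 q.2) PySem.Dict.empty).items = _
  rw [hitems]
  simp only [PySem.Dict.empty, List.nil_append]
  rw [pvG, List.filter_map]
  rw [PySem.List.foldl_append_if
    (fun user => decide (1 < (PySem.Set.ofList ((communities.filter (fun p => decide (user ∈ p.2))).map (fun p => p.1))).length))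
    (fun user => (user, PySem.Set.ofList ((communities.filter (fun p => decide (user ∈ p.2))).map (fun p => p.1))))]
  simp [pvComm, pvUsers, Function.comp_def]
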